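-- pv_equiv track=rewrite | github.com/chodeus/chub | backend/util/arr.py | extract_poster_url
-- ===== SOURCE A (Python) =====
-- from typing import Any, Dict, List, Optional, Union
--
-- def extract_poster_url(item: dict) -> Optional[str]:
--     """
--     Extract poster URL from ARR response images array.
--
--     Looks for the first available poster image from:
--     1. 'poster' coverType
--     2. Any image with URL if no poster found
--
--     Args:
--         item: ARR API response item
--
--     Returns:
--         Optional[str]: Poster URL or None if no suitable image found
--     """
--     images = item.get("images", [])
--     if not images:
--         return None
--
--     # First priority: find image with coverType 'poster'
--     for image in images:
--         if image.get("coverType") == "poster":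
--             # Prefer remoteUrl over url for external accessibility
--             poster_url = image.get("remoteUrl") or image.get("url")
--             if poster_url:
--                 return poster_url
--
--     # Fallback: use the first image with a URL
--     for image in images:
--         poster_url = image.get("remoteUrl") or image.get("url")
--         if poster_url:
--             return poster_url
--
--     return None
-- ===== SOURCE B (Python) =====
-- def extract_poster_url(item: dict):
--     """Single pass over images keeping the first URL-bearing image as a
--     fallback; a poster with a URL returns immediately."""
--     fallback = None
--     for image in item.get("images", []):
--         cand = image.get("remoteUrl") or image.get("url")
--         if image.get("coverType") == "poster" and cand:
--             return cand
--         if fallback is None and cand: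
--             fallback = cand
--     return fallback
-- ===== Notes on version B (the rewrite author's own statement) =====
-- stated objective: simpler
-- what changed: Replaces A's two sequential scans (posters first, then any-URL fallback) by one pass that keeps the first URL-bearing image in a fallback variable and returns immediately on a poster with a URL.
import Mathlib
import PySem

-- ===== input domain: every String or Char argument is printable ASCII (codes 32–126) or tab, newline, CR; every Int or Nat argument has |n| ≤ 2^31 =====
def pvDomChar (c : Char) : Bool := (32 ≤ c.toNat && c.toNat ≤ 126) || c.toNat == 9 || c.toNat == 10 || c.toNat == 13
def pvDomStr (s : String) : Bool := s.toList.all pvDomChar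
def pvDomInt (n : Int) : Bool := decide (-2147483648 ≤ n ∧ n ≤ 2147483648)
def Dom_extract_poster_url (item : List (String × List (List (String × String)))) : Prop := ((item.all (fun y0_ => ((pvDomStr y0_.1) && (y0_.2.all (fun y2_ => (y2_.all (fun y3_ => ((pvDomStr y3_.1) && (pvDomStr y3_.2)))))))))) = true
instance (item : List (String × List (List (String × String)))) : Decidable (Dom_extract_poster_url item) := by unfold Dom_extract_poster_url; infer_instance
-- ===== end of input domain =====

-- B replaces A's two sequential scans by one pass with a fallback variable (objective: simpler).

-- ===== PORT A =====
-- item.get("images", []) on the outer assoc-list dict: first matching key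
def pvGetItem (d : List (String × List (List (String × String)))) (k : String) : Option (List (List (String × String))) :=
  match d with
  | [] => none
  | (a, b) :: t => if a = k then some b else pvGetItem t k

-- image.get(k) on an assoc-list dict: first matching key (exact for Python dict.get; keys are unique)
def pvGetA (d : List (String × String)) (k : String) : Option String :=
  match d with
  | [] => none
  | (a, b) :: t => if a = k then some b else pvGetA t k

-- truthiness of image.get(...) results ('' and None are falsy)
def pvTruthy (o : Option String) : Bool :=
  match o with
  | some s => s ≠ ""
  | none => false

-- poster_url = image.get("remoteUrl") or image.get("url")
def pvCand (d : List (String × String)) : Option String :=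
  if pvTruthy (pvGetA d "remoteUrl") then pvGetA d "remoteUrl" else pvGetA d "url"

-- first loop of A: first poster-typed image with a truthy URL
def pvPass1 : List (List (String × String)) → Option String
  | [] => none
  | d :: t =>
    if pvGetA d "coverType" = some "poster" then
      if pvTruthy (pvCand d) then pvCand d else pvPass1 t
    else pvPass1 t

-- second loop of A: first image with a truthy URL
def pvPass2 : List (List (String × String)) → Option String
  | [] => none
  | d :: t => if pvTruthy (pvCand d) then pvCand d else pvPass2 t

def extract_poster_url (item : List (String × List (List (String × String)))) : Option String :=
  let images := (pvGetItem item "images").getD []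
  if images = [] then none
  else
    match pvPass1 images with
    | some u => some u
    | none => pvPass2 images

-- ===== PORT B =====
-- single pass: return a poster-with-URL immediately, else remember the first URL as fallback
def pvGo (fallback : Option String) : List (List (String × String)) → Option String
  | [] => fallback
  | d :: t =>
    let c := pvCand d
    if pvGetA d "coverType" = some "poster" && pvTruthy c then c
    else if fallback = none && pvTruthy c then pvGo c t
    else pvGo fallback t

def extract_poster_url_alt (item : List (String × List (List (String × String)))) : Option String :=
  pvGo none ((pvGetItem item "images").getD [])

-- ===== PRECONDITION & SPEC =====
def Spec_extract_poster_url (item : List (String × List (List (String × String)))) (out : Option String) : Prop := out = extract_poster_url_alt item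
instance (item : List (String × List (List (String × String)))) (out : Option String) : Decidable (Spec_extract_poster_url item out) := by unfold Spec_extract_poster_url; infer_instance

-- ===== CLAIM (what is proved, stated in full; the proofs are below) =====
def Claim_equal_extract_poster_url : Prop := ∀ (item : List (String × List (List (String × String)))), Dom_extract_poster_url item → Spec_extract_poster_url item (extract_poster_url item)

-- ===== LEMMAS AND PROOFS =====

-- the single pass computes: first poster-with-URL, else the fallback argument, else the first URL
theorem pvGo_eq (images : List (List (String × String))) : ∀ (fb : Option String),
    pvGo fb images =
      match pvPass1 images with
      | some u => some u
      | none => match fb with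
        | some u => some u
        | none => pvPass2 images := by
  induction images with
  | nil => intro fb; cases fb <;> simp [pvGo, pvPass1, pvPass2]
  | cons d t ih =>
    intro fb
    by_cases hp : pvGetA d "coverType" = some "poster" <;>
      by_cases hc : pvTruthy (pvCand d) = true <;>
      cases fb <;>
      simp [pvGo, pvPass1, pvPass2, hp, hc, ih] <;>
      (try (cases h1 : pvPass1 t <;> simp [h1])) <;>
      (try (cases hcd : pvCand d <;> simp [pvTruthy, hcd] at hc ⊢))

-- when there is no URL at all, pvGo none returns none even on the 'empty' shortcut of A
theorem extract_poster_url_spec : Claim_equal_extract_poster_url := by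
  intro item _
  unfold Spec_extract_poster_url extract_poster_url extract_poster_url_alt
  cases h : (pvGetItem item "images").getD [] with
  | nil => simp [pvGo]
  | cons d t => simp [pvGo_eq]
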